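-- pv_equiv track=rewrite | github.com/SumitPatel-HQ/QueryCraft | backend/api/services/upload/sql_importer.py | _clean_sql_for_sqlite
-- ===== SOURCE A (Python) =====
-- def _clean_sql_for_sqlite(sql_content: str) -> str:
--     """
--     Clean PostgreSQL SQL dump for SQLite compatibility
--
--     Args:
--         sql_content: Raw SQL content
--
--     Returns:
--         Cleaned SQL compatible with SQLite
--     """
--     lines = sql_content.split('\n')
--     cleaned_lines = []
--     in_create_table = False
--     create_buffer = []
--
--     for line in lines:
--         line_stripped = line.strip()
--         line_upper = line_stripped.upper()
--
--         # Skip comments and empty lines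
--         if not line_stripped or line_stripped.startswith('--'):
--             continue
--
--         # Detect CREATE TABLE start
--         if line_upper.startswith('CREATE TABLE'):
--             in_create_table = True
--             # Remove schema qualifier (public.)
--             line_cleaned = line.replace('public.', '').replace('PUBLIC.', '')
--             create_buffer = [line_cleaned]
--             continue
--
--         # Collect CREATE TABLE lines
--         if in_create_table:
--             create_buffer.append(line)
--             # Check if CREATE TABLE ends
--             if ');' in line or line_stripped.endswith(';'):
--                 in_create_table = False
--                 # Filter out PostgreSQL-specific constraints
--                 create_sql = '\n'.join(create_buffer)
--                 # Remove CONSTRAINT lines (foreign keys, etc.)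
--                 create_lines = create_sql.split('\n')
--                 filtered_create = []
--                 for cline in create_lines:
--                     cline_upper = cline.strip().upper()
--                     # Skip constraint definitions
--                     if 'CONSTRAINT' in cline_upper or 'FOREIGN KEY' in cline_upper:
--                         continue
--                     # Remove trailing commas before closing paren
--                     if cline.strip() == ');':
--                         # Check if previous line has comma
--                         if filtered_create and filtered_create[-1].rstrip().endswith(','):
--                             filtered_create[-1] = filtered_create[-1].rstrip()[:-1]
--                     filtered_create.append(cline)
--                 cleaned_lines.extend(filtered_create)
--                 create_buffer = []
--             continue
--
--         # Detect INSERT statements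
--         if line_upper.startswith('INSERT INTO'):
--             # Remove schema qualifier
--             line_cleaned = line.replace('public.', '').replace('PUBLIC.', '')
--             cleaned_lines.append(line_cleaned)
--             continue
--
--         # Skip SET, ALTER, GRANT, and other PostgreSQL-specific statements
--         skip_keywords = ['SET ', 'ALTER ', 'GRANT ', 'REVOKE ', 'COMMENT ', 'SELECT pg_']
--         if any(line_upper.startswith(kw) for kw in skip_keywords):
--             continue
--
--     return '\n'.join(cleaned_lines)
-- ===== SOURCE B (Python) =====
-- def _clean_sql_for_sqlite(sql_content: str) -> str:
--     """Single streaming pass: CREATE TABLE bodies are constraint-filtered and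
--     comma-fixed while being collected, so no join/re-split second pass is needed."""
--     cleaned_lines = []
--     buf = None  # list while inside a CREATE TABLE block, else None
--     for line in sql_content.split('\n'):
--         s = line.strip()
--         if not s or s.startswith('--'):
--             continue
--         u = s.upper()
--         if u.startswith('CREATE TABLE'):
--             # a new header (re)starts a block; it is dropped too if it names a constraint
--             h = line.replace('public.', '').replace('PUBLIC.', '')
--             hu = h.strip().upper()
--             buf = [] if 'CONSTRAINT' in hu or 'FOREIGN KEY' in hu else [h]
--         elif buf is not None:
--             if 'CONSTRAINT' not in u and 'FOREIGN KEY' not in u: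
--                 if s == ');' and buf and buf[-1].rstrip().endswith(','):
--                     buf[-1] = buf[-1].rstrip()[:-1]
--                 buf.append(line)
--             if ');' in line or s.endswith(';'):
--                 cleaned_lines.extend(buf)
--                 buf = None
--         elif u.startswith('INSERT INTO'):
--             cleaned_lines.append(line.replace('public.', '').replace('PUBLIC.', ''))
--     return '\n'.join(cleaned_lines)
-- ===== Notes on version B (the rewrite author's own statement) =====
-- stated objective: simpler
-- what changed: CREATE TABLE blocks are no longer buffered raw and then joined, re-split and re-filtered in a second pass: B filters constraint lines and applies the trailing-comma fix in the same single streaming pass that collects the block, using an Option buffer instead of a separate in_create_table flag.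
import Mathlib
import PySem

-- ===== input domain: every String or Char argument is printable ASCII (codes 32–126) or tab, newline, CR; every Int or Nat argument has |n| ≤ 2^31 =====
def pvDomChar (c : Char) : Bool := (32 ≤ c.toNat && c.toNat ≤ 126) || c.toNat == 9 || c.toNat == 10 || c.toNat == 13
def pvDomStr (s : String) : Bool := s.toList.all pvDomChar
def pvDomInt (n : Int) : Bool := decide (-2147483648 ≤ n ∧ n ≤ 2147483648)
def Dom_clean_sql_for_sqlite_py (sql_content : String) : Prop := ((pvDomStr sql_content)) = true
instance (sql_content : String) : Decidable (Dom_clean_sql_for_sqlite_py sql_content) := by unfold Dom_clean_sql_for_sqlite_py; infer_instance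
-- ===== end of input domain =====

-- B rewrites A's CREATE TABLE handling (buffer, join, re-split, second filter pass) as a
-- single streaming pass that constraint-filters and comma-fixes block lines as they arrive;
-- objective: simpler (one pass, no join/re-split), same O(n) cost.

-- helpers shared by both ports (code both Pythons contain verbatim)
-- line.replace('public.', '').replace('PUBLIC.', '')
def pvStripQual (line : String) : String :=
  PySem.Str.replace (PySem.Str.replace line "public." "") "PUBLIC." ""

-- 'CONSTRAINT' in t or 'FOREIGN KEY' in t  (t an upper-cased stripped line)
def pvIsConstraint (t : String) : Bool :=
  PySem.Str.isIn "CONSTRAINT" t || PySem.Str.isIn "FOREIGN KEY" t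

-- if lst and lst[-1].rstrip().endswith(','): lst[-1] = lst[-1].rstrip()[:-1]
def pvFixTrailingComma (lst : List String) : List String :=
  match lst.getLast? with
  | none => lst
  | some last =>
      if PySem.Str.endswith (PySem.Str.rstrip last) "," = true then
        lst.dropLast ++ [PySem.Str.slice (PySem.Str.rstrip last) none (some (-1))]
      else lst

-- ===== PORT A =====
-- body of A's second pass over a completed CREATE TABLE buffer
def pvAFilterStep (filtered : List String) (cline : String) : List String :=
  let cu := PySem.Str.upper (PySem.Str.strip cline)
  if pvIsConstraint cu = true then filtered
  else
    let filtered := if PySem.Str.strip cline = ");" then pvFixTrailingComma filtered else filtered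
    filtered ++ [cline]

-- A's loop body; state = (cleaned_lines, in_create_table, create_buffer)
def pvStepA (st : List String × Bool × List String) (line : String) :
    List String × Bool × List String :=
  let s := PySem.Str.strip line
  let u := PySem.Str.upper s
  if s = "" ∨ PySem.Str.startswith s "--" = true then st
  else if PySem.Str.startswith u "CREATE TABLE" = true then
    (st.1, true, [pvStripQual line])
  else if st.2.1 = true then
    let buf := st.2.2 ++ [line]
    if PySem.Str.isIn ");" line = true ∨ PySem.Str.endswith s ";" = true then
      let create_sql := PySem.Str.join "\n" buf
      let create_lines := (PySem.Str.split? create_sql "\n").getD []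
      (st.1 ++ create_lines.foldl pvAFilterStep [], false, [])
    else (st.1, st.2.1, buf)
  else if PySem.Str.startswith u "INSERT INTO" = true then
    (st.1 ++ [pvStripQual line], st.2.1, st.2.2)
  else if ["SET ", "ALTER ", "GRANT ", "REVOKE ", "COMMENT ", "SELECT pg_"].any
      (fun kw => PySem.Str.startswith u kw) = true then st
  else st

def clean_sql_for_sqlite_py (sql_content : String) : String :=
  let lines := (PySem.Str.split? sql_content "\n").getD []
  let st := lines.foldl pvStepA (([], false, []) : List String × Bool × List String)
  PySem.Str.join "\n" st.1

-- ===== PORT B =====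
-- B's loop body; state = (cleaned_lines, buf), buf = some _ while inside a CREATE TABLE block
def pvStepB (st : List String × Option (List String)) (line : String) :
    List String × Option (List String) :=
  let s := PySem.Str.strip line
  if s = "" ∨ PySem.Str.startswith s "--" = true then st
  else
    let u := PySem.Str.upper s
    if PySem.Str.startswith u "CREATE TABLE" = true then
      let h := pvStripQual line
      let hu := PySem.Str.upper (PySem.Str.strip h)
      (st.1, some (if pvIsConstraint hu = true then [] else [h]))
    else
      match st.2 with
      | some buf =>
          let buf :=
            if pvIsConstraint u = false then
              (if s = ");" then pvFixTrailingComma buf else buf) ++ [line]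
            else buf
          if PySem.Str.isIn ");" line = true ∨ PySem.Str.endswith s ";" = true then
            (st.1 ++ buf, none)
          else (st.1, some buf)
      | none =>
          if PySem.Str.startswith u "INSERT INTO" = true then
            (st.1 ++ [pvStripQual line], none)
          else st

def clean_sql_for_sqlite_py_alt (sql_content : String) : String :=
  let lines := (PySem.Str.split? sql_content "\n").getD []
  let st := lines.foldl pvStepB (([], none) : List String × Option (List String))
  PySem.Str.join "\n" st.1

-- ===== PRECONDITION & SPEC =====
def Spec_clean_sql_for_sqlite_py (sql_content : String) (out : String) : Prop := out = clean_sql_for_sqlite_py_alt sql_content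
instance (sql_content : String) (out : String) : Decidable (Spec_clean_sql_for_sqlite_py sql_content out) := by unfold Spec_clean_sql_for_sqlite_py; infer_instance

-- ===== CLAIM (what is proved, stated in full; the proofs are below) =====
def Claim_equal_clean_sql_for_sqlite_py : Prop := ∀ (sql_content : String), Dom_clean_sql_for_sqlite_py sql_content → Spec_clean_sql_for_sqlite_py sql_content (clean_sql_for_sqlite_py sql_content)

-- ===== LEMMAS AND PROOFS =====

def pvNoNL (s : String) : Prop := '\n' ∉ s.toList

def pvKeep (x : String) : Bool := !pvIsConstraint (PySem.Str.upper (PySem.Str.strip x))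

lemma pvReplaceGo_noNL (old new : List Char) (hnew : '\n' ∉ new) :
    ∀ fuel (l acc : List Char), '\n' ∉ l → '\n' ∉ acc →
      '\n' ∉ PySem.Chars.replace.go old new fuel l acc := by
  intro fuel
  induction fuel with
  | zero =>
      intro l acc hl hacc
      rw [PySem.Chars.replace.go]
      simp_all
  | succ f ih =>
      intro l acc hl hacc
      cases l with
      | nil => rw [PySem.Chars.replace.go]; simp_all; omega
      | cons c t =>
          rw [PySem.Chars.replace.go]
          split
          · exact ih _ _ (fun h => hl (List.mem_of_mem_drop h)) (by
              simp only [List.mem_append, List.mem_reverse]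
              rintro (h | h)
              · exact hnew h
              · exact hacc h)
          · exact ih _ _ (fun h => hl (List.mem_cons_of_mem _ h)) (by
              simp only [List.mem_cons]
              rintro (h | h)
              · exact hl (h ▸ List.mem_cons_self)
              · exact hacc h)

lemma pvSplitOnGo (c : Char) :
    ∀ fuel (l cur : List Char) (acc : List (List Char)), l.length < fuel →
      PySem.Chars.splitOn.go [c] fuel l cur acc
        = acc.reverse ++ (List.splitOn c l).modifyHead (cur.reverse ++ ·) := by
  intro fuel
  induction fuel with
  | zero => intro l cur acc h; omega
  | succ f ih =>
      intro l cur acc h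
      cases l with
      | nil =>
          rw [PySem.Chars.splitOn.go.eq_def]
          simp [List.splitOn, List.splitOnP_nil]
      | cons x t =>
          rw [PySem.Chars.splitOn.go.eq_def]
          simp only [List.length_cons] at h
          by_cases hx : c = x
          · subst hx
            simp only [List.isPrefixOf, BEq.rfl, Bool.true_and,
              if_pos, List.length_cons, List.length_nil]
            have hd : List.drop (0 + 1) (c :: t) = t := by simp
            rw [hd, ih t [] _ (by omega)]
            have hsp : List.splitOn c (c :: t) = [] :: List.splitOn c t := by
              simp [List.splitOn, List.splitOnP_cons]
            rw [hsp]
            cases List.splitOn c t <;> simp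
          · have : [c].isPrefixOf (x :: t) = false := by
              simp [List.isPrefixOf]
              exact fun hc => absurd hc hx
            simp only [this, Bool.false_eq_true, if_neg, not_false_iff]
            rw [ih t (x :: cur) acc (by omega)]
            have hsp : List.splitOn c (x :: t) = List.modifyHead (fun l => x :: l) (List.splitOn c t) := by
              simp [List.splitOn, List.splitOnP_cons]
              intro hc
              exact absurd hc.symm hx
            rw [hsp]
            congr 1
            cases hsq : List.splitOn c t with
            | nil => exact absurd hsq (List.splitOnP_ne_nil _ t)
            | cons a as => simp

lemma pvSplitOn_eq (c : Char) (cs : List Char) :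
    PySem.Chars.splitOn cs [c] = List.splitOn c cs := by
  unfold PySem.Chars.splitOn
  rw [pvSplitOnGo c _ cs [] [] (by omega)]
  cases List.splitOn c cs <;> simp

lemma pvSplitOn_not_mem (c : Char) :
    ∀ (cs p : List Char), p ∈ List.splitOn c cs → c ∉ p := by
  intro cs
  induction cs with
  | nil =>
      intro p hp
      simp [List.splitOn, List.splitOnP_nil] at hp
      subst hp
      simp
  | cons x t ih =>
      intro p hp
      by_cases hx : x = c
      · subst hx
        have hsp : List.splitOn x (x :: t) = [] :: List.splitOn x t := by
          simp [List.splitOn, List.splitOnP_cons]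
        rw [hsp] at hp
        rcases List.mem_cons.mp hp with hp | hp
        · subst hp; simp
        · exact ih p hp
      · have hsp : List.splitOn c (x :: t) = List.modifyHead (fun l => x :: l) (List.splitOn c t) := by
          simp [List.splitOn, List.splitOnP_cons]
          intro hc
          exact absurd hc hx
        rw [hsp] at hp
        cases hsq : List.splitOn c t with
        | nil => exact absurd hsq (List.splitOnP_ne_nil _ t)
        | cons a as =>
            rw [hsq] at hp
            simp only [List.modifyHead, List.mem_cons] at hp
            rcases hp with hp | hp
            · subst hp
              intro hc
              rcases List.mem_cons.mp hc with hc | hc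
              · exact hx hc.symm
              · exact ih a (hsq ▸ List.mem_cons_self) hc
            · exact ih p (hsq ▸ List.mem_cons_of_mem _ hp)

lemma pvReplace_noNL (s old new : String) (hold : old.toList ≠ [])
    (hnew : '\n' ∉ new.toList) (hs : pvNoNL s) : pvNoNL (PySem.Str.replace s old new) := by
  unfold pvNoNL at *
  unfold PySem.Str.replace
  rw [String.toList_ofList]
  unfold PySem.Chars.replace
  rw [if_neg (by simpa using hold)]
  exact pvReplaceGo_noNL _ _ hnew _ _ _ hs (by simp)

lemma pvStripQual_noNL (line : String) (h : pvNoNL line) : pvNoNL (pvStripQual line) := by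
  unfold pvStripQual
  exact pvReplace_noNL _ _ _ (by decide) (by decide)
    (pvReplace_noNL _ _ _ (by decide) (by decide) h)

lemma pvSplitLines_noNL (s : String) :
    ∀ l ∈ (PySem.Str.split? s "\n").getD [], pvNoNL l := by
  intro l hl
  unfold PySem.Str.split? PySem.Chars.split? at hl
  rw [if_neg (by decide)] at hl
  simp only [Option.map_some, Option.getD_some, List.mem_map] at hl
  obtain ⟨q, hq, rfl⟩ := hl
  have : PySem.Chars.splitOn s.toList "\n".toList = List.splitOn '\n' s.toList := by
    have h1 : "\n".toList = ['\n'] := by decide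
    rw [h1, pvSplitOn_eq]
  rw [this] at hq
  unfold pvNoNL
  rw [String.toList_ofList]
  exact pvSplitOn_not_mem '\n' _ _ hq

lemma pvJoinSplit (parts : List String) (hne : parts ≠ [])
    (hnl : ∀ p ∈ parts, pvNoNL p) :
    (PySem.Str.split? (PySem.Str.join "\n" parts) "\n").getD [] = parts := by
  unfold PySem.Str.split? PySem.Str.join PySem.Chars.split?
  rw [if_neg (by decide)]
  simp only [Option.map_some, Option.getD_some]
  rw [String.toList_ofList]
  have h1 : "\n".toList = ['\n'] := by decide
  rw [h1]
  unfold PySem.Chars.join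
  rw [pvSplitOn_eq]
  rw [List.splitOn_intercalate (parts.map String.toList) '\n'
        (by
          intro l hl
          obtain ⟨p, hp, rfl⟩ := List.mem_map.mp hl
          exact hnl p hp)
        (by simpa using hne)]
  rw [List.map_map]
  have hmap : List.map (String.ofList ∘ String.toList) parts = List.map id parts :=
    List.map_congr_left (fun p _ => String.ofList_toList)
  rw [hmap, List.map_id]

lemma pvEndswith_ne (x : String)
    (h : PySem.Str.endswith (PySem.Str.strip x) ";" = false) :
    PySem.Str.strip x ≠ ");" := by
  intro he
  rw [he] at h
  exact absurd h (by decide)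

lemma pvAFilterStep_step (acc : List String) (x : String)
    (hx : PySem.Str.strip x ≠ ");") :
    pvAFilterStep acc x = acc ++ (if pvKeep x = true then [x] else []) := by
  unfold pvAFilterStep pvKeep
  cases hc : pvIsConstraint (PySem.Str.upper (PySem.Str.strip x)) <;>
    simp [hx, hc]

lemma pvAFilter_no_paren (xs : List String)
    (hxs : ∀ x ∈ xs, PySem.Str.endswith (PySem.Str.strip x) ";" = false) :
    ∀ acc, xs.foldl pvAFilterStep acc = acc ++ xs.filter pvKeep := by
  induction xs with
  | nil => intro acc; simp
  | cons x t ih =>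
      intro acc
      simp only [List.foldl_cons]
      rw [pvAFilterStep_step acc x (pvEndswith_ne x (hxs x List.mem_cons_self)),
          ih (fun y hy => hxs y (List.mem_cons_of_mem _ hy))]
      cases hk : pvKeep x <;> simp [hk]

lemma pvAFilterStep_nil (h : String) :
    pvAFilterStep [] h = List.filter pvKeep [h] := by
  unfold pvAFilterStep pvKeep pvFixTrailingComma
  cases hc : pvIsConstraint (PySem.Str.upper (PySem.Str.strip h)) <;>
    simp [hc]

-- the simulation relation between A's state and B's state
def pvRel (stA : List String × Bool × List String)
    (stB : List String × Option (List String)) : Prop :=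
  stB.1 = stA.1 ∧
  (stA.2.1 = true → ∃ h mid, stA.2.2 = h :: mid ∧
      stB.2 = some ((h :: mid).filter pvKeep) ∧
      (∀ x ∈ mid, PySem.Str.endswith (PySem.Str.strip x) ";" = false) ∧
      pvNoNL h ∧ ∀ x ∈ mid, pvNoNL x) ∧
  (stA.2.1 = false → stB.2 = none)

lemma pvStep_rel (stA : List String × Bool × List String)
    (stB : List String × Option (List String)) (line : String)
    (hnl : pvNoNL line) (hrel : pvRel stA stB) :
    pvRel (pvStepA stA line) (pvStepB stB line) := by
  obtain ⟨clA, ictA, bufA⟩ := stA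
  obtain ⟨clB, bufB⟩ := stB
  obtain ⟨h1, h2, h3⟩ := hrel
  simp only at h1 h2 h3
  subst h1
  unfold pvStepA pvStepB
  by_cases hskip : PySem.Str.strip line = "" ∨ PySem.Str.startswith (PySem.Str.strip line) "--" = true
  · rw [if_pos hskip, if_pos hskip]
    exact ⟨rfl, h2, h3⟩
  · rw [if_neg hskip, if_neg hskip]
    by_cases hct : PySem.Str.startswith (PySem.Str.upper (PySem.Str.strip line)) "CREATE TABLE" = true
    · rw [if_pos hct, if_pos hct]
      refine ⟨rfl, ?_, by simp⟩
      intro _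
      refine ⟨pvStripQual line, [], rfl, ?_, by simp, pvStripQual_noNL line hnl, by simp⟩
      cases hc : pvIsConstraint (PySem.Str.upper (PySem.Str.strip (pvStripQual line))) <;>
        simp [pvKeep, hc]
    · rw [if_neg hct, if_neg hct]
      cases ictA with
      | true =>
          obtain ⟨h, mid, hbuf, hb, hmid, hnlh, hnlmid⟩ := h2 rfl
          subst hbuf
          subst hb
          rw [if_pos rfl]
          dsimp only
          by_cases hfl : PySem.Str.isIn ");" line = true ∨
              PySem.Str.endswith (PySem.Str.strip line) ";" = true
          · rw [if_pos hfl, if_pos hfl]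
            have hlines : (PySem.Str.split? (PySem.Str.join "\n" ((h :: mid) ++ [line])) "\n").getD []
                = (h :: mid) ++ [line] := by
              refine pvJoinSplit _ (by simp) ?_
              intro p hp
              simp only [List.cons_append, List.mem_cons, List.mem_append,
                List.not_mem_nil, or_false] at hp
              rcases hp with rfl | hp | rfl
              · exact hnlh
              · exact hnlmid p hp
              · exact hnl
            rw [hlines]
            have hinner : List.foldl pvAFilterStep [] (h :: mid) = (h :: mid).filter pvKeep := by
              rw [List.foldl_cons, pvAFilterStep_nil, pvAFilter_no_paren mid hmid,
                  show (h :: mid) = [h] ++ mid from rfl, List.filter_append]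
            have hfold : List.foldl pvAFilterStep [] ((h :: mid) ++ [line])
                = pvAFilterStep ((h :: mid).filter pvKeep) line := by
              rw [List.foldl_append, hinner, List.foldl_cons, List.foldl_nil]
            rw [hfold]
            have hstep : pvAFilterStep ((h :: mid).filter pvKeep) line
                = (if pvIsConstraint (PySem.Str.upper (PySem.Str.strip line)) = false then
                    (if PySem.Str.strip line = ");" then
                      pvFixTrailingComma ((h :: mid).filter pvKeep)
                    else (h :: mid).filter pvKeep) ++ [line]
                  else (h :: mid).filter pvKeep) := by
              unfold pvAFilterStep
              cases hc : pvIsConstraint (PySem.Str.upper (PySem.Str.strip line)) <;> simp [hc]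
            rw [hstep]
            exact ⟨rfl, by simp, fun _ => rfl⟩
          · rw [if_neg hfl, if_neg hfl]
            rw [not_or] at hfl
            obtain ⟨hfl1, hfl2⟩ := hfl
            have hne : PySem.Str.strip line ≠ ");" :=
              pvEndswith_ne line (by simpa using hfl2)
            refine ⟨rfl, ?_, by simp⟩
            intro _
            refine ⟨h, mid ++ [line], by rw [List.cons_append], ?_, ?_, hnlh, ?_⟩
            · rw [if_neg hne]
              have hfc : (h :: (mid ++ [line])).filter pvKeep
                  = (h :: mid).filter pvKeep ++ [line].filter pvKeep := by
                rw [show (h :: (mid ++ [line])) = (h :: mid) ++ [line] by simp,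
                    List.filter_append]
              rw [hfc]
              cases hc : pvIsConstraint (PySem.Str.upper (PySem.Str.strip line)) <;>
                simp [List.filter_cons, pvKeep, hc]
            · intro x hx
              rcases List.mem_append.mp hx with hx | hx
              · exact hmid x hx
              · rw [List.mem_singleton.mp hx]
                simpa using hfl2
            · intro x hx
              rcases List.mem_append.mp hx with hx | hx
              · exact hnlmid x hx
              · rw [List.mem_singleton.mp hx]; exact hnl
      | false =>
          have hb := h3 rfl
          subst hb
          rw [if_neg (by simp)]
          dsimp only
          by_cases hins : PySem.Str.startswith (PySem.Str.upper (PySem.Str.strip line))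
              "INSERT INTO" = true
          · rw [if_pos hins, if_pos hins]
            exact ⟨rfl, by simp, fun _ => rfl⟩
          · rw [if_neg hins, if_neg hins]
            split <;> exact ⟨rfl, by simp, fun _ => rfl⟩

lemma pvFold_rel (lines : List String) :
    ∀ stA stB, (∀ l ∈ lines, pvNoNL l) → pvRel stA stB →
      pvRel (lines.foldl pvStepA stA) (lines.foldl pvStepB stB) := by
  induction lines with
  | nil => intro stA stB _ hrel; exact hrel
  | cons x t ih =>
      intro stA stB hnl hrel
      simp only [List.foldl_cons]
      exact ih _ _ (fun l hl => hnl l (List.mem_cons_of_mem _ hl))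
        (pvStep_rel stA stB x (hnl x List.mem_cons_self) hrel)

-- ===== VERDICT (by name: the statement is the Claim_ definition above) =====
theorem clean_sql_for_sqlite_py_spec : Claim_equal_clean_sql_for_sqlite_py := by
  intro sql_content _
  unfold Spec_clean_sql_for_sqlite_py clean_sql_for_sqlite_py clean_sql_for_sqlite_py_alt
  have hrel := pvFold_rel ((PySem.Str.split? sql_content "\n").getD [])
    (([], false, []) : List String × Bool × List String)
    (([], none) : List String × Option (List String))
    (pvSplitLines_noNL sql_content)
    ⟨rfl, by simp, fun _ => rfl⟩
  change PySem.Str.join "\n" (List.foldl pvStepA ([], false, []) ((PySem.Str.split? sql_content "\n").getD [])).1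
      = PySem.Str.join "\n" (List.foldl pvStepB ([], none) ((PySem.Str.split? sql_content "\n").getD [])).1
  rw [hrel.1]
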